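-- pv_equiv track=rewrite | github.com/bnkf1156f/EDA_intra_class_variation | postannotation_scripts/4. generate_pdf.py | _infer_variant_labels
-- ===== SOURCE A (Python) =====
-- def _infer_variant_labels(contrastive_groups):
--     """
--     Derive legend labels from class name suffixes across all groups.
--     Each group has N variants at position 0..N-1. If all groups agree on the
--     suffix token at position i (splitting on '_'), use that token; else 'Variant i+1'.
--     Returns list of label strings, length = max variants across all groups.
--     """
--     max_n = max((len(v) for v in contrastive_groups.values()), default=1)
--     labels = []
--     for i in range(max_n):
--         # collect the last token of class name at position i in each group that has one
--         tokens = []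
--         for class_list in contrastive_groups.values():
--             if i < len(class_list):
--                 parts = class_list[i].split('_')
--                 tokens.append(parts[-1] if parts else class_list[i])
--         unique = set(tokens)
--         if len(unique) == 1:
--             labels.append(tokens[0])
--         else:
--             labels.append(f'Variant {i + 1}')
--     return labels
-- ===== SOURCE B (Python) =====
-- def _infer_variant_labels(contrastive_groups):
--     """Transposed one-pass re-implementation: pour every group's last '_'-tokens
--     into per-position sets once, then reduce each column to a label."""
--     if not contrastive_groups:
--         return ['Variant 1']
--     cols = []
--     for class_list in contrastive_groups.values():
--         for j, name in enumerate(class_list):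
--             if j == len(cols):
--                 cols.append(set())
--             cols[j].add(name.split('_')[-1])
--     return [next(iter(col)) if len(col) == 1 else 'Variant %d' % (i + 1)
--             for i, col in enumerate(cols)]
-- ===== Notes on version B (the rewrite author's own statement) =====
-- stated objective: alternative
-- what changed: B makes one pass over the groups, merging each class list's last '_'-tokens into a transposed per-position set table, then reduces each column to a label, instead of A's rescan of every group at every position 0..max_n-1.
import Mathlib
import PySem

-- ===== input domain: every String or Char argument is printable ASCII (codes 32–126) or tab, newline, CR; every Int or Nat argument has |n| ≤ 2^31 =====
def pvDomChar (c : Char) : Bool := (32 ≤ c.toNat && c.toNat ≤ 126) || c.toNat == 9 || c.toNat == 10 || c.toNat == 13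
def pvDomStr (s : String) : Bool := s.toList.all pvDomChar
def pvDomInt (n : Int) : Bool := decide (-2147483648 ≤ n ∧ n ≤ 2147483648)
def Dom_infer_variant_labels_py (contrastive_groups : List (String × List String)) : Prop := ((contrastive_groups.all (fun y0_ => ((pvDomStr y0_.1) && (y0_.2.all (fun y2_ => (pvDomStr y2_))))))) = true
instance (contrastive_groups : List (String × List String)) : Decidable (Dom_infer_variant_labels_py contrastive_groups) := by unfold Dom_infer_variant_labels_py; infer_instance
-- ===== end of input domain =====

-- B rebuilds the labels from a transposed per-position token table built in one pass over the
-- groups (objective: alternative decomposition, same cost); A rescans every group at every position.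

-- ===== PORT A =====
-- `parts[-1] if parts else class_list[i]` after `parts = class_list[i].split('_')`
-- (split('_') with a nonempty separator never returns [], so the guard and pyGetD's default are unreachable; exact).
def pvTokA (s : String) : String :=
  let parts := (PySem.Str.split? s "_").getD []   -- '_' ≠ "", so split? is `some …`
  if parts = [] then s else PySem.List.pyGetD parts (-1) s

-- the body of A's `for i in range(max_n)` loop (tokens, unique, the appended label)
def pvLabelA (contrastive_groups : List (String × List String)) (i : Int) : String :=
  let tokens := contrastive_groups.foldl (fun toks p =>
    if i < (p.2.length : Int) then toks ++ [pvTokA (PySem.List.pyGetD p.2 i "")] else toks) []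
  let unique := PySem.Set.ofList tokens
  if PySem.Set.len unique = 1 then PySem.List.pyGetD tokens 0 "" else "Variant " ++ PySem.Int.toStr (i + 1)

def infer_variant_labels_py (contrastive_groups : List (String × List String)) : List String :=
  let maxn : Int :=
    (PySem.List.max? (contrastive_groups.map (fun p => (p.2.length : Int))) (fun x => x)).getD 1
  (PySem.List.pyRange 0 maxn 1).foldl (fun labels i => labels ++ [pvLabelA contrastive_groups i]) []

-- ===== PORT B =====
-- `name.split('_')[-1]` (split('_') is never [], so pyGetD's default is unreachable; exact)
def pvLastToken (name : String) : String :=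
  PySem.List.pyGetD ((PySem.Str.split? name "_").getD []) (-1) name

-- the body of B's inner loop: `if j == len(cols): cols.append(set())` then `cols[j].add(...)`
def pvAddTok (c : List (PySem.Set String)) (j : Int) (name : String) : List (PySem.Set String) :=
  let c1 := if j = (c.length : Int) then c ++ [PySem.Set.empty] else c
  PySem.List.pySetD c1 j
    (PySem.Set.add (PySem.List.pyGetD c1 j PySem.Set.empty) (pvLastToken name))

-- B's inner loop `for j, name in enumerate(class_list)`
def pvAddRow (cols : List (PySem.Set String)) (names : List String) : List (PySem.Set String) :=
  (PySem.List.enumerate names 0).foldl (fun c jn => pvAddTok c jn.1 jn.2) cols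

def infer_variant_labels_py_alt (contrastive_groups : List (String × List String)) : List String :=
  if contrastive_groups = [] then ["Variant 1"]
  else
    let cols := contrastive_groups.foldl (fun c p => pvAddRow c p.2) []
    (PySem.List.enumerate cols 0).map (fun ic =>
      -- `next(iter(col))` on a singleton set is its only element: the head
      if PySem.Set.len ic.2 = 1 then ic.2.headD "" else "Variant " ++ PySem.Int.toStr (ic.1 + 1))

-- ===== PRECONDITION & SPEC =====
def Spec_infer_variant_labels_py (contrastive_groups : List (String × List String)) (out : List String) : Prop := out = infer_variant_labels_py_alt contrastive_groups
instance (contrastive_groups : List (String × List String)) (out : List String) : Decidable (Spec_infer_variant_labels_py contrastive_groups out) := by unfold Spec_infer_variant_labels_py; infer_instance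

-- ===== CLAIM (what is proved, stated in full; the proofs are below) =====
def Claim_equal_infer_variant_labels_py : Prop := ∀ (contrastive_groups : List (String × List String)), Dom_infer_variant_labels_py contrastive_groups → Spec_infer_variant_labels_py contrastive_groups (infer_variant_labels_py contrastive_groups)

-- ===== LEMMAS AND PROOFS =====

-- split('_') never yields the empty list
theorem pv_go_len (sep : List Char) : ∀ (fuel : Nat) (l cur : List Char) (acc : List (List Char)),
    acc.length < (PySem.Chars.splitOn.go sep fuel l cur acc).length := by
  intro fuel
  induction fuel with
  | zero => intro l cur acc; simp [PySem.Chars.splitOn.go]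
  | succ n ih =>
    intro l cur acc
    cases l with
    | nil => simp [PySem.Chars.splitOn.go]
    | cons c rest =>
      rw [PySem.Chars.splitOn.go]
      split
      · exact Nat.lt_of_succ_lt (by simpa using ih (List.drop sep.length (c::rest)) [] (cur.reverse :: acc))
      · exact ih rest (c :: cur) acc

theorem pv_split_ne_nil (s : String) : (PySem.Str.split? s "_").getD [] ≠ [] := by
  have h := pv_go_len ['_'] (s.length + 1) s.toList [] []
  simp [PySem.Str.split?, PySem.Chars.split?, PySem.Chars.splitOn]
  intro hmap
  rw [hmap] at h; simp at h

theorem pv_tok_eq (s : String) : pvLastToken s = pvTokA s := by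
  unfold pvLastToken pvTokA
  simp [pv_split_ne_nil s]

-- the tokens A collects at position k, in group order
def pvTk (gs : List (String × List String)) (k : Nat) : List String :=
  gs.filterMap (fun p => p.2[k]?.map pvTokA)

theorem pv_tokens_eq (k : Nat) : ∀ (gs : List (String × List String)) (acc : List String),
    gs.foldl (fun toks p =>
      if (k : Int) < (p.2.length : Int) then toks ++ [pvTokA (PySem.List.pyGetD p.2 (k : Int) "")] else toks) acc
    = acc ++ pvTk gs k := by
  intro gs
  induction gs with
  | nil => intro acc; simp [pvTk]
  | cons p gs ih =>
    intro acc
    by_cases hk : k < p.2.length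
    · have h1 : ((k : Int) < (p.2.length : Int)) := by exact_mod_cast hk
      have h2 : PySem.List.pyGetD p.2 (k : Int) "" = p.2[k] := by
        simp [PySem.List.pyGetD_natCast, List.getD_eq_getElem?_getD, List.getElem?_eq_getElem hk]
      simp only [List.foldl_cons, if_pos h1, h2, ih, pvTk, List.filterMap_cons,
        List.getElem?_eq_getElem hk, Option.map_some]
      simp
    · have h1 : ¬ ((k : Int) < (p.2.length : Int)) := by exact_mod_cast hk
      simp only [List.foldl_cons, if_neg h1, ih, pvTk, List.filterMap_cons]
      have : p.2[k]? = none := by simp; omega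
      simp [this]

theorem pv_addTok_get (cc : List (PySem.Set String)) (j : Nat) (hj : j ≤ cc.length)
    (n : String) (k : Nat) :
    (pvAddTok cc (j : Int) n)[k]? =
      if k = j then some (PySem.Set.add (cc.getD j PySem.Set.empty) (pvLastToken n))
      else (cc[k]?) := by
  unfold pvAddTok
  by_cases hje : j = cc.length
  · subst hje
    simp only [if_true, PySem.List.pySetD_natCast, PySem.List.pyGetD_natCast]
    have hg : (cc ++ [PySem.Set.empty]).getD cc.length PySem.Set.empty = PySem.Set.empty := by
      simp [List.getD_eq_getElem?_getD]
    have hg2 : cc.getD cc.length PySem.Set.empty = PySem.Set.empty := by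
      simp [List.getD_eq_getElem?_getD]
    rw [hg, hg2, List.getElem?_set]
    by_cases hk : k = cc.length
    · subst hk; simp
    · simp only [hk, if_false]
      have h1 : ¬ (cc.length = k) := by omega
      rw [if_neg h1]
      rcases Nat.lt_or_gt_of_ne hk with h2 | h2
      · exact List.getElem?_append_left h2
      · rw [List.getElem?_eq_none_iff.mpr (by simp; omega),
            List.getElem?_eq_none_iff.mpr (by omega)]
  · have hlt : j < cc.length := by omega
    have hne : ¬ ((j : Int) = (cc.length : Int)) := by omega
    simp only [if_neg hne, PySem.List.pySetD_natCast, PySem.List.pyGetD_natCast,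
      List.getElem?_set]
    by_cases hk : k = j
    · subst hk; simp [hlt]
    · have hjk2 : ¬ (j = k) := by omega
      simp [hk, hjk2]

theorem pv_addTok_length (cc : List (PySem.Set String)) (j : Nat) (hj : j ≤ cc.length)
    (n : String) : (pvAddTok cc (j : Int) n).length = max cc.length (j + 1) := by
  unfold pvAddTok
  by_cases hje : j = cc.length
  · subst hje
    simp [PySem.List.pySetD_natCast]
  · have hne : ((j : Int) = (cc.length : Int)) = False := by simp; omega
    simp only [hne, if_false, PySem.List.pySetD_natCast, List.length_set]
    omega

theorem pv_addRow_go (names : List String) : ∀ (j : Nat) (cc : List (PySem.Set String)),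
    j ≤ cc.length → ∀ k : Nat,
    ((PySem.List.enumerate names (j : Int)).foldl (fun cc jn => pvAddTok cc jn.1 jn.2) cc)[k]? =
      if j ≤ k then
        match names[k - j]? with
        | some n => some (PySem.Set.add (cc.getD k PySem.Set.empty) (pvLastToken n))
        | none => (cc[k]?)
      else (cc[k]?) := by
  induction names with
  | nil =>
    intro j cc hj k
    simp only [PySem.List.enumerate_nil, List.foldl_nil, List.getElem?_nil]
    split <;> rfl
  | cons n ns ih =>
    intro j cc hj k
    rw [PySem.List.enumerate_cons]
    have hcast : (j : Int) + 1 = ((j + 1 : Nat) : Int) := by push_cast; ring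
    rw [List.foldl_cons, hcast]
    have hj2 : j + 1 ≤ (pvAddTok cc (j : Int) n).length := by
      rw [pv_addTok_length cc j hj n]; omega
    rw [ih (j + 1) _ hj2 k]
    rcases lt_trichotomy k j with hk | hk | hk
    · -- untouched prefix
      rw [if_neg (by omega), if_neg (by omega), pv_addTok_get cc j hj n k, if_neg (by omega)]
    · -- the position this step writes
      subst hk
      rw [if_neg (by omega), if_pos (le_refl k), pv_addTok_get cc k hj n k, if_pos rfl]
      simp
    · -- positions later entries write
      rw [if_pos (by omega), if_pos (by omega)]
      have hget : (pvAddTok cc (j : Int) n)[k]? = cc[k]? := by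
        rw [pv_addTok_get cc j hj n k, if_neg (by omega)]
      have hgetD : (pvAddTok cc (j : Int) n).getD k PySem.Set.empty = cc.getD k PySem.Set.empty := by
        simp [List.getD_eq_getElem?_getD, hget]
      have hidx : ns[k - (j + 1)]? = (n :: ns)[k - j]? := by
        have h1 : k - j = (k - (j + 1)) + 1 := by omega
        rw [h1, List.getElem?_cons_succ]
      rw [hgetD, hidx, hget]

theorem pv_addRow_get (cols : List (PySem.Set String)) (names : List String) (k : Nat) :
    (pvAddRow cols names)[k]? =
      match names[k]? with
      | some n => some (PySem.Set.add (cols.getD k PySem.Set.empty) (pvLastToken n))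
      | none => cols[k]? := by
  unfold pvAddRow
  have h := pv_addRow_go names 0 cols (Nat.zero_le _) k
  rw [Int.natCast_zero] at h
  rw [h, if_pos (Nat.zero_le k), Nat.sub_zero]

-- the column an option-set and a token list combine to
def pvCombine (co : Option (PySem.Set String)) (ts : List String) : Option (PySem.Set String) :=
  match co, ts with
  | none, [] => none
  | _, _ => some (ts.foldl PySem.Set.add (co.getD PySem.Set.empty))

theorem pv_fold_get : ∀ (gs : List (String × List String)) (cols : List (PySem.Set String)) (k : Nat),
    (gs.foldl (fun c p => pvAddRow c p.2) cols)[k]? = pvCombine cols[k]? (pvTk gs k) := by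
  intro gs
  induction gs with
  | nil =>
    intro cols k
    simp only [List.foldl_nil, pvTk, List.filterMap_nil, pvCombine]
    cases cols[k]? <;> simp
  | cons p gs ih =>
    intro cols k
    simp only [List.foldl_cons, ih, pvTk, List.filterMap_cons]
    cases h : p.2[k]? with
    | none => rw [pv_addRow_get, h]; simp
    | some n =>
      rw [pv_addRow_get, h]
      simp only [Option.map_some]
      show pvCombine (some _) _ = _
      unfold pvCombine
      cases hc : cols[k]? with
      | none =>
        simp [List.getD_eq_getElem?_getD, hc, pv_tok_eq]
      | some c =>
        simp [List.getD_eq_getElem?_getD, hc, pv_tok_eq]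

-- `set` built by consecutive adds only appends
theorem pv_foldl_add_prefix {α : Type} [BEq α] : ∀ (l : List α) (s : PySem.Set α),
    ∃ u, l.foldl PySem.Set.add s = s ++ u := by
  intro l
  induction l with
  | nil => intro s; exact ⟨[], by simp⟩
  | cons x xs ih =>
    intro s
    obtain ⟨u, hu⟩ := ih (PySem.Set.add s x)
    rw [List.foldl_cons, hu]
    by_cases h : List.contains s x = true
    · exact ⟨u, by simp [PySem.Set.add, h]⟩
    · exact ⟨x :: u, by simp [PySem.Set.add, h]⟩

theorem pv_ofList_head (t : String) (l : List String) :
    (PySem.Set.ofList (t :: l) : List String).headD "" = t := by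
  unfold PySem.Set.ofList
  rw [List.foldl_cons]
  have hadd : PySem.Set.add (PySem.Set.empty : PySem.Set String) t = [t] := by
    simp [PySem.Set.add, PySem.Set.empty]
  rw [hadd]
  obtain ⟨u, hu⟩ := pv_foldl_add_prefix l [t]
  rw [hu]; simp

theorem pv_main (gs : List (String × List String)) :
    infer_variant_labels_py gs = infer_variant_labels_py_alt gs := by
  by_cases hgs : gs = []
  · subst hgs; rfl
  · -- the maximum group length
    obtain ⟨m, hm⟩ : ∃ m, PySem.List.max? (gs.map (fun p => (p.2.length : Int))) (fun x => x) = some m := by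
      cases h : PySem.List.max? (gs.map (fun p => (p.2.length : Int))) (fun x => x) with
      | none => rw [PySem.List.max?_eq_none_iff] at h; simp [hgs] at h
      | some m => exact ⟨m, rfl⟩
    have hmem := PySem.List.max?_mem hm
    have hmax := PySem.List.max?_isMax hm
    obtain ⟨p0, hp0, hp0m⟩ := List.mem_map.mp hmem
    have hm0 : 0 ≤ m := by omega
    set N := m.toNat with hN
    have hmN : m = (N : Int) := by omega
    -- characterize k < N
    have hlt : ∀ k : Nat, (k < N ↔ pvTk gs k ≠ []) := by
      intro k
      constructor
      · intro hk
        have hk' : k < p0.2.length := by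
          have := hp0m; omega
        have : pvTokA p0.2[k] ∈ pvTk gs k := by
          unfold pvTk
          apply List.mem_filterMap.mpr
          exact ⟨p0, hp0, by simp [List.getElem?_eq_getElem hk']⟩
        intro hnil; rw [hnil] at this; simp at this
      · intro hne
        obtain ⟨t, ht⟩ := List.exists_mem_of_ne_nil _ hne
        unfold pvTk at ht
        obtain ⟨p, hp, hpt⟩ := List.mem_filterMap.mp ht
        cases h : p.2[k]? with
        | none => rw [h] at hpt; simp at hpt
        | some v =>
          obtain ⟨hk, -⟩ := List.getElem?_eq_some_iff.mp h
          have := hmax _ (List.mem_map.mpr ⟨p, hp, rfl⟩)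
          omega
    -- the column list of B
    set cols := gs.foldl (fun c p => pvAddRow c p.2) [] with hcols
    have hget : ∀ k : Nat, cols[k]? = pvCombine none (pvTk gs k) := by
      intro k; rw [hcols, pv_fold_get]; simp
    have hlen : cols.length = N := by
      have h1 : ∀ k : Nat, k < cols.length ↔ k < N := by
        intro k
        rw [hlt k]
        constructor
        · intro hk
          have := List.getElem?_eq_getElem hk
          rw [hget] at this
          intro hnil
          rw [hnil] at this
          simp [pvCombine] at this
        · intro hne
          by_contra hge
          have : cols[k]? = none := List.getElem?_eq_none_iff.mpr (by omega)
          rw [hget] at this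
          cases h : pvTk gs k with
          | nil => exact hne h
          | cons t ts => rw [h] at this; simp [pvCombine] at this
      have ha := h1 cols.length
      have hb := h1 N
      omega
    -- unfold both sides to maps over range N
    unfold infer_variant_labels_py infer_variant_labels_py_alt
    rw [if_neg hgs]
    simp only [hm, Option.getD_some, hmN, PySem.List.foldl_append_singleton_eq_map,
      List.nil_append, PySem.List.pyRange_zero_natCast, List.map_map, ← hcols]
    apply List.ext_getElem?
    intro k
    by_cases hk : k < N
    · rw [List.getElem?_map, List.getElem?_map,
        List.getElem?_eq_getElem (by simpa using hk), PySem.List.getElem?_enumerate,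
        List.getElem?_eq_getElem (by omega : k < cols.length)]
      simp only [List.getElem_range, Option.map_some, Function.comp_apply]
      -- compute cols[k]
      have hts : pvTk gs k ≠ [] := (hlt k).mp hk
      obtain ⟨t, ts, hts'⟩ : ∃ t ts, pvTk gs k = t :: ts := by
        cases h : pvTk gs k with
        | nil => exact absurd h hts
        | cons t ts => exact ⟨t, ts, rfl⟩
      have hcol : cols[k] = PySem.Set.ofList (pvTk gs k) := by
        have h2 := hget k
        rw [List.getElem?_eq_getElem (by omega : k < cols.length), hts'] at h2
        have h3 : pvCombine none (t :: ts) = some (PySem.Set.ofList (t :: ts)) := rfl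
        rw [h3] at h2
        rw [hts']
        exact Option.some.inj h2
      -- compute A's label
      unfold pvLabelA
      rw [pv_tokens_eq k gs []]
      simp only [List.nil_append, hcol, zero_add]
      rw [hts']
      by_cases hone : PySem.Set.len (PySem.Set.ofList (t :: ts)) = 1
      · rw [if_pos hone, if_pos hone, pv_ofList_head]
        simp [PySem.List.pyGetD_zero_cons]
      · rw [if_neg hone, if_neg hone]
    · rw [List.getElem?_map, List.getElem?_map]
      rw [List.getElem?_eq_none_iff.mpr (by simpa using hk)]
      rw [List.getElem?_eq_none_iff.mpr (by simp [PySem.List.length_enumerate]; omega)]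
      simp

-- ===== VERDICT (by name: the statement is the Claim_ definition above) =====
theorem infer_variant_labels_py_spec : Claim_equal_infer_variant_labels_py := by
  intro gs _
  unfold Spec_infer_variant_labels_py
  exact pv_main gs
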